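-- pv_equiv track=rewrite | github.com/theRealAndyYang/FIT2004-Algorithm-and-Data-Structure | Assignment 1/task1.py | radix_aux
-- ===== SOURCE A (Python) =====
-- def get_digit(num, digit):
--     """
--     this function simplyt get the right most digit for the input number
--     @param num: a integer
--     @param digit: the which digit should it get
--     @return the specific digit of the integer
--     @time complexity: O(1)
--     @space complexity: O(1)
--     """
--     return num[-digit]
--
-- def radix_aux(array, b, digit):
--     """
--     this function performs counting sort for each single row of specific digit in the array
--     @param array: the array which need to sorted
--     @param b: the target base
--     @param digit: the target digit
--     @return: the sorted array in the order of specific digit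
--     @time complexity: O(n) where n is size of the array
--     @space complexity: O(n) where n is size of the array
--     """
--     size = len(array)
--     count = [0] * (b)
--     for i in range(0, size):
--         count[get_digit(array[i], digit)] += 1
--     position = [0] + ([0] * b)
--     for i in range(1, b+1):
--         position[i] = position[i-1] + count[i-1]
--     temp = [0] * size
--     for i in range(0, size):
--         temp_digit = get_digit(array[i], digit)
--         temp[position[temp_digit]] = array[i]
--         position[temp_digit] += 1
--     for i in range(size):
--         array[i] = temp[i]
--     return array
-- ===== SOURCE B (Python) =====
-- def get_digit(num, digit):
--     return num[-digit]
--
-- def radix_aux(array, b, digit):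
--     buckets = [[] for _ in range(b)]
--     for elem in array:
--         buckets[get_digit(elem, digit)].append(elem)
--     idx = 0
--     for bucket in buckets:
--         for elem in bucket:
--             array[idx] = elem
--             idx += 1
--     return array
-- ===== Notes on version B (the rewrite author's own statement) =====
-- stated objective: simpler
-- what changed: Replaces the count/prefix-position/scatter counting sort by direct bucket distribution: one pass appends each element to buckets[get_digit(elem, digit)], then the buckets are walked in order writing the elements back into the array.
-- outside the precondition, e.g. on radix_aux([[-3], [2]], 3, 1): A returns [0, [2]], B returns [[-3], [2]]
import Mathlib
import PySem

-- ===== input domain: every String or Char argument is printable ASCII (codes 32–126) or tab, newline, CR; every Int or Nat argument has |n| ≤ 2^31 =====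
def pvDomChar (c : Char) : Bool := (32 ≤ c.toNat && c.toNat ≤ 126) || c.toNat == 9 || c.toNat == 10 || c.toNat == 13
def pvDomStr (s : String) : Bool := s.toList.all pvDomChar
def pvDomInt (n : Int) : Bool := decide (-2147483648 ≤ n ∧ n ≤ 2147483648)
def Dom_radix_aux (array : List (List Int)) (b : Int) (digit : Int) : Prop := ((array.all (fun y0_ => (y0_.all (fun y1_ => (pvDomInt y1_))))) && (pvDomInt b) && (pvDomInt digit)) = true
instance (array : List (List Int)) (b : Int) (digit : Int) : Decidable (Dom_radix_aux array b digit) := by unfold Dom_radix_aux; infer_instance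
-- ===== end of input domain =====

-- B replaces the count/prefix-position/scatter counting sort by bucket distribution followed by an
-- in-order write-back (objective: simpler). Both Pythons mutate `array` in place the same way; the
-- equivalence proved here is about the return value.

-- ===== PORT A =====
-- num[-digit]; total form of the Python indexing, exact whenever the index is valid (Pre_ guarantees it)
def get_digit (num : List Int) (digit : Int) : Int :=
  PySem.List.pyGetD num (-digit) 0

def radix_aux (array : List (List Int)) (b : Int) (digit : Int) : List (List Int) :=
  let size : Int := PySem.List.len array
  let count0 : List Int := List.replicate b.toNat 0                        -- [0] * b
  let count := (PySem.List.pyRange 0 size 1).foldl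
      (fun cnt i =>
        let row := PySem.List.pyGetD array i []
        PySem.List.pySetD cnt (get_digit row digit)
          (PySem.List.pyGetD cnt (get_digit row digit) 0 + 1))
      count0
  let position0 : List Int := 0 :: List.replicate b.toNat 0                -- [0] + [0] * b
  let position := (PySem.List.pyRange 1 (b + 1) 1).foldl
      (fun pos i =>
        PySem.List.pySetD pos i
          (PySem.List.pyGetD pos (i - 1) 0 + PySem.List.pyGetD count (i - 1) 0))
      position0
  -- temp = [0] * size : the int placeholder 0 is ported as []; under Pre_ every slot is overwritten
  let temp0 : List (List Int) := List.replicate size.toNat []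
  let tp := (PySem.List.pyRange 0 size 1).foldl
      (fun (tp : List (List Int) × List Int) i =>
        let row := PySem.List.pyGetD array i []
        (PySem.List.pySetD tp.1 (PySem.List.pyGetD tp.2 (get_digit row digit) 0) row,
         PySem.List.pySetD tp.2 (get_digit row digit)
           (PySem.List.pyGetD tp.2 (get_digit row digit) 0 + 1)))
      (temp0, position)
  (PySem.List.pyRange 0 size 1).foldl
      (fun arr i => PySem.List.pySetD arr i (PySem.List.pyGetD tp.1 i [])) array

-- ===== PORT B =====
def get_digit_alt (num : List Int) (digit : Int) : Int :=
  PySem.List.pyGetD num (-digit) 0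

def radix_aux_alt (array : List (List Int)) (b : Int) (digit : Int) : List (List Int) :=
  let buckets0 : List (List (List Int)) := List.replicate b.toNat []       -- [[] for _ in range(b)]
  let buckets := array.foldl
      (fun bk elem =>
        PySem.List.pySetD bk (get_digit_alt elem digit)
          (PySem.List.pyGetD bk (get_digit_alt elem digit) [] ++ [elem]))
      buckets0
  let st := buckets.foldl
      (fun (st : List (List Int) × Int) bucket =>
        bucket.foldl (fun st2 elem => (PySem.List.pySetD st2.1 st2.2 elem, st2.2 + 1)) st)
      (array, 0)
  st.1

-- ===== PRECONDITION & SPEC =====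
-- Pre_ excludes inputs on which some row's digit index num[-digit] is invalid or the digit value lies
-- outside [0, b): there A either raises IndexError or returns a list still containing the integer-0
-- placeholder (not a value of the declared list-of-rows type).
def Pre_radix_aux (array : List (List Int)) (b : Int) (digit : Int) : Prop :=
  (array.all (fun row =>
    match PySem.List.pyGet? row (-digit) with
    | some d => decide (0 ≤ d ∧ d < b)
    | none => false)) = true

instance (array : List (List Int)) (b : Int) (digit : Int) : Decidable (Pre_radix_aux array b digit) := by
  unfold Pre_radix_aux; infer_instance

def pvWitness_radix_aux : List (List Int) × Int × Int := ([[1], [0]], 2, 1)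

def Spec_radix_aux (array : List (List Int)) (b : Int) (digit : Int) (out : List (List Int)) : Prop :=
  out = radix_aux_alt array b digit

instance (array : List (List Int)) (b : Int) (digit : Int) (out : List (List Int)) : Decidable (Spec_radix_aux array b digit out) := by
  unfold Spec_radix_aux; infer_instance

-- ===== CLAIM (what is proved, stated in full; the proofs are below) =====
def Claim_equal_radix_aux : Prop := ∀ (array : List (List Int)) (b : Int) (digit : Int), Dom_radix_aux array b digit → Pre_radix_aux array b digit → Spec_radix_aux array b digit (radix_aux array b digit)

-- ===== LEMMAS AND PROOFS =====

-- the elements of xs whose digit is d, in order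
def pvFilt (digit d : Int) (xs : List (List Int)) : List (List Int) :=
  xs.filter (fun x => decide (get_digit x digit = d))

-- concatenation of the first n segments f 0 ++ f 1 ++ … ++ f (n-1)
def pvSeg {α : Type} (f : Nat → List α) : Nat → List α
  | 0 => []
  | n + 1 => pvSeg f n ++ f n

theorem pvSeg_congr {α : Type} (f f' : Nat → List α) (n : Nat)
    (h : ∀ j, j < n → f j = f' j) : pvSeg f n = pvSeg f' n := by
  induction n with
  | zero => rfl
  | succ m ih =>
    simp only [pvSeg]
    rw [ih (fun j hj => h j (Nat.lt_succ_of_lt hj)), h m (Nat.lt_succ_self m)]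

theorem pvSeg_length_congr {α : Type} (f f' : Nat → List α) (n : Nat)
    (h : ∀ j, j < n → (f j).length = (f' j).length) :
    (pvSeg f n).length = (pvSeg f' n).length := by
  induction n with
  | zero => rfl
  | succ m ih =>
    simp only [pvSeg, List.length_append]
    rw [ih (fun j hj => h j (Nat.lt_succ_of_lt hj)), h m (Nat.lt_succ_self m)]

theorem pvSeg_nil {α : Type} (n : Nat) : pvSeg (fun _ => ([] : List α)) n = [] := by
  induction n with
  | zero => rfl
  | succ m ih => simp [pvSeg, ih]

theorem pvSeg_replicate {α : Type} (x : α) (m : Nat → Nat) (n : Nat) :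
    pvSeg (fun j => List.replicate (m j) x) n =
      List.replicate (pvSeg (fun j => List.replicate (m j) x) n).length x := by
  induction n with
  | zero => rfl
  | succ q ih =>
    simp only [pvSeg, List.length_append, List.length_replicate]
    rw [List.replicate_add]
    congr 1

theorem pvSeg_length_le {α : Type} (f : Nat → List α) {m n : Nat} (h : m ≤ n) :
    (pvSeg f m).length ≤ (pvSeg f n).length := by
  induction n with
  | zero => have : m = 0 := Nat.le_zero.mp h; subst this; exact le_refl _
  | succ q ih =>
    by_cases hm : m = q + 1
    · subst hm; exact le_refl _
    · exact le_trans (ih (by omega)) (by simp [pvSeg])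

theorem pvSeg_eq_flatten {α : Type} (f : Nat → List α) (n : Nat) :
    pvSeg f n = ((List.range n).map f).flatten := by
  induction n with
  | zero => rfl
  | succ q ih => simp [pvSeg, List.range_succ, ih]

-- writing x into segment k of a segment concatenation, at the first slot after the prefix u of f k
theorem pvSeg_set {α : Type} (f f' : Nat → List α) (k n : Nat) (u v : List α) (x y : α)
    (hk : k < n) (hf : f k = u ++ y :: v) (hf' : f' k = u ++ x :: v)
    (ho : ∀ j, j < n → j ≠ k → f' j = f j) :
    (pvSeg f n).set ((pvSeg f k).length + u.length) x = pvSeg f' n := by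
  induction n with
  | zero => exact absurd hk (Nat.not_lt_zero k)
  | succ q ih =>
    simp only [pvSeg]
    by_cases hkq : k = q
    · subst hkq
      rw [List.set_append_right _ _ (Nat.le_add_right _ _),
          show (pvSeg f k).length + u.length - (pvSeg f k).length = u.length from by omega,
          hf, List.set_append_right _ _ (le_refl _), Nat.sub_self, List.set_cons_zero,
          ← hf', pvSeg_congr f f' k (fun j hj => (ho j (Nat.lt_succ_of_lt hj) (Nat.ne_of_lt hj)).symm)]
    · have hklt : k < q := by omega
      have hidx : (pvSeg f k).length + u.length < (pvSeg f q).length := by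
        have h1 : (pvSeg f (k+1)).length ≤ (pvSeg f q).length := pvSeg_length_le f hklt
        have h2 : (pvSeg f (k+1)).length = (pvSeg f k).length + (f k).length := by
          simp [pvSeg]
        have h3 : (f k).length = u.length + v.length + 1 := by simp [hf]; omega
        omega
      rw [List.set_append_left _ _ hidx,
          ih hklt (fun j hj hjk => ho j (Nat.lt_succ_of_lt hj) hjk),
          ho q (Nat.lt_succ_self q) (fun h => hkq h.symm)]

theorem pvFilt_append (digit d : Int) (xs ys : List (List Int)) :
    pvFilt digit d (xs ++ ys) = pvFilt digit d xs ++ pvFilt digit d ys := by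
  simp [pvFilt, List.filter_append]

theorem seg_filt_cons_length (digit : Int) (x : List Int) (t : List (List Int)) (n : Nat) :
    (pvSeg (fun k => pvFilt digit (k : Int) (x :: t)) n).length =
      (pvSeg (fun k => pvFilt digit (k : Int) t) n).length +
      (if 0 ≤ get_digit x digit ∧ get_digit x digit < (n : Int) then 1 else 0) := by
  induction n with
  | zero =>
    have h : ¬ (0 ≤ get_digit x digit ∧ get_digit x digit < ((0 : Nat) : Int)) := by
      push_cast; omega
    rw [if_neg h]; rfl
  | succ q ih =>
    simp only [pvSeg, List.length_append]
    rw [ih]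
    have hfc : (pvFilt digit ((q : Nat) : Int) (x :: t)).length =
        (pvFilt digit ((q : Nat) : Int) t).length +
        (if get_digit x digit = ((q : Nat) : Int) then 1 else 0) := by
      simp only [pvFilt, List.filter_cons]
      split_ifs with h <;> simp_all
    rw [hfc]
    have hq1 : (((q + 1 : Nat)) : Int) = ((q : Nat) : Int) + 1 := by push_cast; ring
    rw [hq1]
    split_ifs <;> omega

-- total length of the segments = length of the list, when every digit lies in [0, b)
theorem pvSeg_filt_length (digit b : Int) (xs : List (List Int))
    (hx : ∀ x ∈ xs, 0 ≤ get_digit x digit ∧ get_digit x digit < b) :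
    (pvSeg (fun k => pvFilt digit (k : Int) xs) b.toNat).length = xs.length := by
  induction xs with
  | nil =>
    rw [pvSeg_congr _ (fun _ => []) _ (fun j _ => by simp [pvFilt]), pvSeg_nil]
  | cons x t ih =>
    have hd := hx x (List.mem_cons_self)
    have hb : 0 < b := by omega
    have hcast : ((b.toNat : Nat) : Int) = b := Int.toNat_of_nonneg (by omega)
    have hcond : 0 ≤ get_digit x digit ∧ get_digit x digit < ((b.toNat : Nat) : Int) := by
      rw [hcast]; exact hd
    rw [seg_filt_cons_length, ih (fun y hy => hx y (List.mem_cons_of_mem x hy)), if_pos hcond]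
    simp

-- A's count loop
theorem count_loop (digit b : Int) (xs : List (List Int)) (cnt : List Int)
    (hlen : cnt.length = b.toNat)
    (hx : ∀ x ∈ xs, 0 ≤ get_digit x digit ∧ get_digit x digit < b) :
    (xs.foldl (fun cnt row =>
        PySem.List.pySetD cnt (get_digit row digit)
          (PySem.List.pyGetD cnt (get_digit row digit) 0 + 1)) cnt).length = b.toNat ∧
    ∀ k : Nat, k < b.toNat →
      PySem.List.pyGetD (xs.foldl (fun cnt row =>
        PySem.List.pySetD cnt (get_digit row digit)
          (PySem.List.pyGetD cnt (get_digit row digit) 0 + 1)) cnt) (k : Int) 0 =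
      PySem.List.pyGetD cnt (k : Int) 0 + ((pvFilt digit (k : Int) xs).length : Int) := by
  induction xs generalizing cnt with
  | nil => exact ⟨hlen, fun k _ => by simp [pvFilt]⟩
  | cons x t ih =>
    have hd := hx x (List.mem_cons_self)
    have hdn : get_digit x digit = ((get_digit x digit).toNat : Int) :=
      (Int.toNat_of_nonneg hd.1).symm
    have hlt : (get_digit x digit).toNat < b.toNat := by omega
    have hltc : (get_digit x digit).toNat < cnt.length := by omega
    have hlen' : (PySem.List.pySetD cnt (get_digit x digit)
        (PySem.List.pyGetD cnt (get_digit x digit) 0 + 1)).length = b.toNat := by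
      rw [hdn, PySem.List.pySetD_natCast]; simp [hlen]
    obtain ⟨hL, hV⟩ := ih _ hlen' (fun y hy => hx y (List.mem_cons_of_mem x hy))
    refine ⟨hL, fun k hk => ?_⟩
    rw [List.foldl_cons]
    rw [hV k hk]
    have hget : PySem.List.pyGetD (PySem.List.pySetD cnt (get_digit x digit)
        (PySem.List.pyGetD cnt (get_digit x digit) 0 + 1)) (k : Int) 0 =
        if k = (get_digit x digit).toNat then PySem.List.pyGetD cnt (get_digit x digit) 0 + 1
        else PySem.List.pyGetD cnt (k : Int) 0 := by
      rw [hdn, PySem.List.pyGetD_pySetD_natCast cnt _ k _ 0 hltc, Int.toNat_natCast]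
    rw [hget]
    have hfc : (pvFilt digit (k : Int) (x :: t)).length =
        (pvFilt digit (k : Int) t).length +
        (if get_digit x digit = (k : Int) then 1 else 0) := by
      simp only [pvFilt, List.filter_cons]
      by_cases h : get_digit x digit = (k : Int)
      · simp [h]
      · simp [h]
    rw [hfc]
    by_cases hkd : k = (get_digit x digit).toNat
    · rw [if_pos hkd, if_pos (by omega : get_digit x digit = (k : Int))]
      rw [hkd, ← hdn]
      push_cast
      ring
    · rw [if_neg hkd, if_neg (by omega : ¬ get_digit x digit = (k : Int))]
      push_cast
      ring

-- A's position loop, peeled m steps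
theorem pos_loop (digit b : Int) (array : List (List Int)) (c : List Int)
    (hC : ∀ j : Nat, j < b.toNat → PySem.List.pyGetD c (j : Int) 0 = ((pvFilt digit (j : Int) array).length : Int)) :
    ∀ m : Nat, m ≤ b.toNat →
      ((PySem.List.pyRange 1 (1 + (m : Int)) 1).foldl
        (fun pos i =>
          PySem.List.pySetD pos i
            (PySem.List.pyGetD pos (i - 1) 0 + PySem.List.pyGetD c (i - 1) 0))
        (0 :: List.replicate b.toNat 0)).length = b.toNat + 1 ∧
      (∀ k : Nat, k ≤ m →
        PySem.List.pyGetD ((PySem.List.pyRange 1 (1 + (m : Int)) 1).foldl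
          (fun pos i =>
            PySem.List.pySetD pos i
              (PySem.List.pyGetD pos (i - 1) 0 + PySem.List.pyGetD c (i - 1) 0))
          (0 :: List.replicate b.toNat 0)) (k : Int) 0 =
        ((pvSeg (fun j => pvFilt digit (j : Int) array) k).length : Int)) := by
  intro m
  induction m with
  | zero =>
    intro _
    rw [PySem.List.pyRange_one_eq_nil (by omega)]
    refine ⟨by simp, fun k hk => ?_⟩
    have hk0 : k = 0 := Nat.le_zero.mp hk
    subst hk0
    simp [pvSeg, List.foldl_nil, PySem.List.pyGetD_zero_cons]
  | succ q ih =>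
    intro hm
    obtain ⟨hL, hV⟩ := ih (by omega)
    have hsplit : PySem.List.pyRange 1 (1 + ((q + 1 : Nat) : Int)) 1 =
        PySem.List.pyRange 1 (1 + (q : Int)) 1 ++ [1 + (q : Int)] := by
      rw [show (1 + ((q + 1 : Nat) : Int)) = (1 + (q : Int)) + 1 by omega]
      exact PySem.List.pyRange_one_succ_right (by omega)
    rw [hsplit, List.foldl_append, List.foldl_cons, List.foldl_nil]
    have hidx : (1 + (q : Int)) = (((q + 1 : Nat)) : Int) := by push_cast; ring
    have hidx1 : (1 + (q : Int)) - 1 = ((q : Nat) : Int) := by omega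
    have hq1lt : q + 1 < b.toNat + 1 := by omega
    have hval : PySem.List.pyGetD
        ((PySem.List.pyRange 1 (1 + (q : Int)) 1).foldl
          (fun pos i => PySem.List.pySetD pos i
            (PySem.List.pyGetD pos (i - 1) 0 + PySem.List.pyGetD c (i - 1) 0))
          (0 :: List.replicate b.toNat 0)) ((q : Nat) : Int) 0 +
        PySem.List.pyGetD c ((q : Nat) : Int) 0 =
        ((pvSeg (fun j => pvFilt digit (j : Int) array) (q + 1)).length : Int) := by
      rw [hV q (le_refl q), hC q (by omega)]
      simp [pvSeg]
    rw [hidx1, hval]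
    set P := (PySem.List.pyRange 1 (1 + (q : Int)) 1).foldl
      (fun pos i => PySem.List.pySetD pos i
        (PySem.List.pyGetD pos (i - 1) 0 + PySem.List.pyGetD c (i - 1) 0))
      (0 :: List.replicate b.toNat 0) with hP
    have hrw : PySem.List.pySetD P (1 + (q : Int))
        ((pvSeg (fun j => pvFilt digit (j : Int) array) (q + 1)).length : Int) =
        PySem.List.pySetD P (((q + 1 : Nat)) : Int)
        ((pvSeg (fun j => pvFilt digit (j : Int) array) (q + 1)).length : Int) := by
      rw [hidx]
    rw [hrw]
    constructor
    · rw [PySem.List.pySetD_natCast]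
      simp [hL]
    · intro k hk
      rw [PySem.List.pyGetD_pySetD_natCast _ _ _ _ _ (by rw [hL]; omega)]
      by_cases hke : k = q + 1
      · rw [if_pos hke, hke]
      · rw [if_neg hke]
        exact hV k (by omega)

-- A's scatter loop
theorem scatter_loop (digit b : Int) (full : List (List Int))
    (hfull : ∀ x ∈ full, 0 ≤ get_digit x digit ∧ get_digit x digit < b) :
    ∀ (xs p : List (List Int)), p ++ xs = full →
    ∀ (temp : List (List Int)) (pos : List Int),
      temp = pvSeg (fun k => pvFilt digit (k : Int) p ++
               List.replicate (pvFilt digit (k : Int) xs).length ([] : List Int)) b.toNat →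
      pos.length = b.toNat + 1 →
      (∀ k : Nat, k < b.toNat →
        PySem.List.pyGetD pos (k : Int) 0 =
          ((pvSeg (fun j => pvFilt digit (j : Int) full) k).length : Int) +
          ((pvFilt digit (k : Int) p).length : Int)) →
      (xs.foldl
        (fun (tp : List (List Int) × List Int) row =>
          (PySem.List.pySetD tp.1 (PySem.List.pyGetD tp.2 (get_digit row digit) 0) row,
           PySem.List.pySetD tp.2 (get_digit row digit)
             (PySem.List.pyGetD tp.2 (get_digit row digit) 0 + 1)))
        (temp, pos)).1 = pvSeg (fun k => pvFilt digit (k : Int) full) b.toNat := by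
  intro xs
  induction xs with
  | nil =>
    intro p hp temp pos htemp _ _
    rw [List.foldl_nil]
    rw [List.append_nil] at hp
    subst hp
    rw [htemp]
    exact pvSeg_congr _ _ _ (fun j _ => by simp [pvFilt])
  | cons x t ih =>
    intro p hp temp pos htemp hplen hpos
    have hx : x ∈ full := by rw [← hp]; simp
    have hd := hfull x hx
    set d := get_digit x digit with hdd
    have hdn : d = ((d.toNat : Nat) : Int) := (Int.toNat_of_nonneg hd.1).symm
    have hlt : d.toNat < b.toNat := by omega
    rw [List.foldl_cons]
    -- the write index
    have hgetpos : PySem.List.pyGetD pos d 0 =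
        ((pvSeg (fun j => pvFilt digit (j : Int) full) d.toNat).length : Int) +
        ((pvFilt digit ((d.toNat : Nat) : Int) p).length : Int) := by
      rw [hdn]; exact hpos d.toNat hlt
    -- the two segment functions before/after the write
    set f : Nat → List (List Int) := fun k => pvFilt digit (k : Int) p ++
        List.replicate (pvFilt digit (k : Int) (x :: t)).length ([] : List Int) with hf
    set f' : Nat → List (List Int) := fun k => pvFilt digit (k : Int) (p ++ [x]) ++
        List.replicate (pvFilt digit (k : Int) t).length ([] : List Int) with hf'
    have hfiltx : pvFilt digit ((d.toNat : Nat) : Int) (x :: t) =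
        x :: pvFilt digit ((d.toNat : Nat) : Int) t := by
      simp only [pvFilt, List.filter_cons]
      rw [if_pos (by rw [← hdn, ← hdd]; simp)]
    have hfd : f d.toNat = pvFilt digit ((d.toNat : Nat) : Int) p ++
        ([] : List Int) :: List.replicate (pvFilt digit ((d.toNat : Nat) : Int) t).length [] := by
      rw [hf]; simp only [hfiltx, List.length_cons, List.replicate_succ]
    have hfd' : f' d.toNat = pvFilt digit ((d.toNat : Nat) : Int) p ++
        x :: List.replicate (pvFilt digit ((d.toNat : Nat) : Int) t).length [] := by
      rw [hf']; simp only [pvFilt_append]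
      simp [pvFilt, ← hdn, ← hdd]
    have hother : ∀ j, j < b.toNat → j ≠ d.toNat → f' j = f j := by
      intro j hj hne
      rw [hf, hf']
      have h1 : pvFilt digit (j : Int) (p ++ [x]) = pvFilt digit (j : Int) p := by
        rw [pvFilt_append]
        have : pvFilt digit (j : Int) [x] = [] := by
          simp only [pvFilt, List.filter]
          rw [decide_eq_false (by rw [← hdd]; omega : ¬ get_digit x digit = (j : Int))]
      

        rw [this, List.append_nil]
      have h2 : pvFilt digit (j : Int) (x :: t) = pvFilt digit (j : Int) t := by
        simp only [pvFilt, List.filter_cons]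
        rw [if_neg (by rw [← hdd]; simpa using (by omega : ¬ get_digit x digit = (j : Int)))]
      simp only [h1, h2]
    -- length of segments agrees with the full-array segments
    have hseglen : ∀ k : Nat, k ≤ b.toNat → (pvSeg f k).length =
        (pvSeg (fun j => pvFilt digit (j : Int) full) k).length := by
      intro k hkb
      apply pvSeg_length_congr
      intro j _
      rw [hf]
      have : pvFilt digit (j : Int) full = pvFilt digit (j : Int) p ++ pvFilt digit (j : Int) (x :: t) := by
        rw [← hp, pvFilt_append]
      rw [this]
      simp
    -- the write lands exactly at the first filler slot of segment d.toNat
    have hset : (pvSeg f b.toNat).set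
        ((pvSeg f d.toNat).length + (pvFilt digit ((d.toNat : Nat) : Int) p).length) x =
        pvSeg f' b.toNat :=
      pvSeg_set f f' d.toNat b.toNat _ _ x ([] : List Int) hlt hfd hfd' hother
    have hwrite : PySem.List.pySetD temp (PySem.List.pyGetD pos d 0) x = pvSeg f' b.toNat := by
      rw [hgetpos, htemp]
      rw [show ((pvSeg (fun j => pvFilt digit (j : Int) full) d.toNat).length : Int) +
          ((pvFilt digit ((d.toNat : Nat) : Int) p).length : Int) =
          (((pvSeg f d.toNat).length + (pvFilt digit ((d.toNat : Nat) : Int) p).length : Nat) : Int) by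
        rw [hseglen d.toNat (by omega)]; push_cast; ring]
      rw [PySem.List.pySetD_natCast]
      exact hset
    -- the updated position list
    have hpos' : ∀ k : Nat, k < b.toNat →
        PySem.List.pyGetD (PySem.List.pySetD pos d (PySem.List.pyGetD pos d 0 + 1)) (k : Int) 0 =
        ((pvSeg (fun j => pvFilt digit (j : Int) full) k).length : Int) +
        ((pvFilt digit (k : Int) (p ++ [x])).length : Int) := by
      intro k hk
      rw [hdn, PySem.List.pyGetD_pySetD_natCast _ _ _ _ _ (by omega)]
      by_cases hke : k = d.toNat
      · rw [if_pos hke, ← hdn, hgetpos, hke]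
        have : pvFilt digit ((d.toNat : Nat) : Int) (p ++ [x]) =
            pvFilt digit ((d.toNat : Nat) : Int) p ++ [x] := by
          rw [pvFilt_append]
          congr 1
          simp [pvFilt, ← hdn, ← hdd]
        rw [this]
        simp
        ring
      · rw [if_neg hke, hpos k hk]
        have : pvFilt digit (k : Int) (p ++ [x]) = pvFilt digit (k : Int) p := by
          rw [pvFilt_append]
          have hnil : pvFilt digit (k : Int) [x] = [] := by
            simp only [pvFilt, List.filter]
            rw [decide_eq_false (by rw [← hdd]; omega : ¬ get_digit x digit = (k : Int))]
          rw [hnil, List.append_nil]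
        rw [this]
    have happ : (p ++ [x]) ++ t = full := by rw [← hp]; simp
    have := ih (p ++ [x]) happ (pvSeg f' b.toNat)
      (PySem.List.pySetD pos d (PySem.List.pyGetD pos d 0 + 1))
      (by rw [hf'])
      (by rw [hdn, PySem.List.pySetD_natCast]; simp [hplen])
      hpos'
    rw [← this]
    congr 1
    rw [hwrite]

-- B's distribution loop
theorem bucket_loop (digit b : Int) :
    ∀ (xs p : List (List Int)),
      (∀ x ∈ xs, 0 ≤ get_digit x digit ∧ get_digit x digit < b) →
    ∀ bk : List (List (List Int)), bk.length = b.toNat →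
      (∀ k : Nat, k < b.toNat → PySem.List.pyGetD bk (k : Int) [] = pvFilt digit (k : Int) p) →
      (xs.foldl (fun bk elem =>
          PySem.List.pySetD bk (get_digit_alt elem digit)
            (PySem.List.pyGetD bk (get_digit_alt elem digit) [] ++ [elem])) bk).length = b.toNat ∧
      (∀ k : Nat, k < b.toNat →
        PySem.List.pyGetD (xs.foldl (fun bk elem =>
          PySem.List.pySetD bk (get_digit_alt elem digit)
            (PySem.List.pyGetD bk (get_digit_alt elem digit) [] ++ [elem])) bk) (k : Int) [] =
        pvFilt digit (k : Int) (p ++ xs)) := by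
  intro xs
  induction xs with
  | nil =>
    intro p _ bk hlen hval
    refine ⟨hlen, fun k hk => ?_⟩
    rw [List.foldl_nil, List.append_nil]
    exact hval k hk
  | cons x t ih =>
    intro p hx bk hlen hval
    have hd := hx x (List.mem_cons_self)
    have hdn : get_digit_alt x digit = (((get_digit x digit).toNat : Nat) : Int) := by
      rw [show get_digit_alt x digit = get_digit x digit from rfl]
      exact (Int.toNat_of_nonneg hd.1).symm
    have hlt : (get_digit x digit).toNat < b.toNat := by
      have := hd.2; omega
    rw [List.foldl_cons]
    have hlen' : (PySem.List.pySetD bk (get_digit_alt x digit)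
        (PySem.List.pyGetD bk (get_digit_alt x digit) [] ++ [x])).length = b.toNat := by
      rw [hdn, PySem.List.pySetD_natCast]; simp [hlen]
    have hval' : ∀ k : Nat, k < b.toNat →
        PySem.List.pyGetD (PySem.List.pySetD bk (get_digit_alt x digit)
          (PySem.List.pyGetD bk (get_digit_alt x digit) [] ++ [x])) (k : Int) [] =
        pvFilt digit (k : Int) (p ++ [x]) := by
      intro k hk
      rw [hdn, PySem.List.pyGetD_pySetD_natCast _ _ _ _ _ (by omega)]
      rw [pvFilt_append]
      by_cases hke : k = (get_digit x digit).toNat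
      · rw [if_pos hke, ← hke, hval k hk]
        congr 1
        have hgx : get_digit x digit = (k : Int) := by omega
        simp [pvFilt, hgx]
      · rw [if_neg hke, hval k hk]
        have hnil : pvFilt digit (k : Int) [x] = [] := by
          simp only [pvFilt, List.filter]
          rw [decide_eq_false (by omega : ¬ get_digit x digit = (k : Int))]
        rw [hnil, List.append_nil]
    obtain ⟨hL, hV⟩ := ih (p ++ [x]) (fun y hy => hx y (List.mem_cons_of_mem x hy)) _ hlen' hval'
    refine ⟨hL, fun k hk => ?_⟩
    rw [hV k hk]
    congr 1
    simp

-- B's write-back of one flat list, starting at index i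
theorem write_seq (ys : List (List Int)) :
    ∀ (arr : List (List Int)) (i : Nat), i + ys.length ≤ arr.length →
      ys.foldl (fun (st2 : List (List Int) × Int) e =>
          (PySem.List.pySetD st2.1 st2.2 e, st2.2 + 1)) (arr, (i : Int)) =
        (arr.take i ++ ys ++ arr.drop (i + ys.length), ((i + ys.length : Nat) : Int)) := by
  induction ys with
  | nil =>
    intro arr i _
    simp [List.take_append_drop]
  | cons y t ih =>
    intro arr i h
    have hi : i < arr.length := by simp at h; omega
    rw [List.foldl_cons]
    have hstep : ((PySem.List.pySetD arr (i : Int) y, (i : Int) + 1) :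
        List (List Int) × Int) = (arr.set i y, (((i + 1 : Nat)) : Int)) := by
      rw [PySem.List.pySetD_natCast]
      simp
    rw [hstep, ih (arr.set i y) (i + 1) (by rw [List.length_set]; simp at h; omega)]
    have hlt' : (arr.take i).length = i := by rw [List.length_take]; omega
    have htake : (arr.set i y).take (i + 1) = arr.take i ++ [y] := by
      rw [List.take_set, List.take_succ_eq_append_getElem hi,
          List.set_append_right _ _ (le_of_eq hlt')]
      congr 1
      rw [hlt', Nat.sub_self]
      rfl
    have hdrop : (arr.set i y).drop (i + 1 + t.length) = arr.drop (i + (t.length + 1)) := by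
      rw [List.drop_set, if_pos (by omega)]
      congr 1
      omega
    rw [htake, hdrop, Prod.mk.injEq]
    constructor
    · simp [List.append_assoc]
    · simp only [List.length_cons]
      congr 1
      omega

-- the final copy loop of A: array[i] = temp[i] for i in range(size)
theorem copy_aux (t : List (List Int)) :
    ∀ (k : Nat) (arr : List (List Int)), arr.length = t.length → k ≤ t.length →
      arr.take (t.length - k) = t.take (t.length - k) →
      (PySem.List.pyRange ((t.length - k : Nat) : Int) ((t.length : Nat) : Int) 1).foldl
        (fun arr i => PySem.List.pySetD arr i (PySem.List.pyGetD t i [])) arr = t := by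
  intro k
  induction k with
  | zero =>
    intro arr hlen _ htake
    rw [PySem.List.pyRange_one_eq_nil (by omega)]
    rw [List.foldl_nil]
    rw [Nat.sub_zero] at htake
    rw [← List.take_length (l := arr), hlen, htake, List.take_length]
  | succ q ih =>
    intro arr hlen hk htake
    have hi : t.length - (q + 1) < t.length := by omega
    rw [PySem.List.pyRange_one_cons (by omega)]
    rw [List.foldl_cons]
    have hgt : PySem.List.pyGetD t ((t.length - (q + 1) : Nat) : Int) [] =
        t[t.length - (q + 1)]'hi := by
      rw [PySem.List.pyGetD_natCast, List.getD_eq_getElem?_getD, List.getElem?_eq_getElem hi]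
      rfl
    have hstep : PySem.List.pySetD arr ((t.length - (q + 1) : Nat) : Int)
        (PySem.List.pyGetD t ((t.length - (q + 1) : Nat) : Int) []) =
        arr.set (t.length - (q + 1)) (t[t.length - (q + 1)]'hi) := by
      rw [hgt, PySem.List.pySetD_natCast]
    have hcast : ((t.length - (q + 1) : Nat) : Int) + 1 = ((t.length - q : Nat) : Int) := by
      omega
    rw [hstep, hcast]
    apply ih
    · simp [hlen]
    · omega
    · have hq1 : t.length - q = (t.length - (q + 1)) + 1 := by omega
      have hia : t.length - (q + 1) < arr.length := by omega
      have hll : (arr.take (t.length - (q + 1))).length = t.length - (q + 1) := by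
        rw [List.length_take]; omega
      rw [hq1, List.take_set, List.take_succ_eq_append_getElem hia,
          List.set_append_right _ _ (le_of_eq hll), hll, Nat.sub_self,
          List.set_cons_zero, List.take_succ_eq_append_getElem hi, htake]

theorem pre_elim (array : List (List Int)) (b digit : Int) (h : Pre_radix_aux array b digit) :
    ∀ x ∈ array, 0 ≤ get_digit x digit ∧ get_digit x digit < b := by
  intro x hmem
  unfold Pre_radix_aux at h
  rw [List.all_eq_true] at h
  have hx := h x hmem
  cases hcase : PySem.List.pyGet? x (-digit) with
  | none => rw [hcase] at hx; simp at hx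
  | some d =>
    rw [hcase] at hx
    simp only [decide_eq_true_eq] at hx
    have : get_digit x digit = d := by
      simp [get_digit, PySem.List.pyGetD, hcase]
    rw [this]
    exact hx

-- B's value: always the segment concatenation of the digit classes
theorem alt_eq_target (array : List (List Int)) (b digit : Int)
    (hx : ∀ x ∈ array, 0 ≤ get_digit x digit ∧ get_digit x digit < b) :
    radix_aux_alt array b digit = pvSeg (fun k => pvFilt digit (k : Int) array) b.toNat := by
  simp only [radix_aux_alt]
  obtain ⟨hL, hV⟩ := bucket_loop digit b array [] hx (List.replicate b.toNat [])
    (by simp)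
    (fun k hk => by
      rw [PySem.List.pyGetD_natCast]
      simp [pvFilt, List.getD])
  have hBeq : array.foldl
      (fun bk elem =>
        PySem.List.pySetD bk (get_digit_alt elem digit)
          (PySem.List.pyGetD bk (get_digit_alt elem digit) [] ++ [elem]))
      (List.replicate b.toNat []) =
      (List.range b.toNat).map (fun k : Nat => pvFilt digit (k : Int) array) := by
    apply List.ext_getElem
    · simp [hL]
    · intro k h1 h2
      have hk : k < b.toNat := by rw [hL] at h1; exact h1
      have hv := hV k hk
      rw [List.nil_append] at hv
      rw [PySem.List.pyGetD_natCast, List.getD_eq_getElem?_getD,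
          List.getElem?_eq_getElem h1, Option.getD_some] at hv
      rw [hv]
      simp
  rw [hBeq, ← List.foldl_flatten, ← pvSeg_eq_flatten]
  have hlen : (pvSeg (fun k => pvFilt digit (k : Int) array) b.toNat).length = array.length :=
    pvSeg_filt_length digit b array hx
  have hws := write_seq (pvSeg (fun k => pvFilt digit (k : Int) array) b.toNat) array 0
    (by rw [hlen]; omega)
  rw [Nat.cast_zero] at hws
  rw [hws]
  simp [hlen, List.drop_length]

-- A's value: the same segment concatenation
theorem a_eq_target (array : List (List Int)) (b digit : Int)
    (hx : ∀ x ∈ array, 0 ≤ get_digit x digit ∧ get_digit x digit < b) :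
    radix_aux array b digit = pvSeg (fun k => pvFilt digit (k : Int) array) b.toNat := by
  simp only [radix_aux, PySem.List.len_eq, Int.toNat_natCast]
  rw [PySem.List.foldl_pyRange_zero_pyGetD' array ([] : List Int)
      (fun cnt row => PySem.List.pySetD cnt (get_digit row digit)
        (PySem.List.pyGetD cnt (get_digit row digit) 0 + 1))
      (List.replicate b.toNat 0)]
  rw [PySem.List.foldl_pyRange_zero_pyGetD' array ([] : List Int)
      (fun (tp : List (List Int) × List Int) row =>
        (PySem.List.pySetD tp.1 (PySem.List.pyGetD tp.2 (get_digit row digit) 0) row,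
         PySem.List.pySetD tp.2 (get_digit row digit)
           (PySem.List.pyGetD tp.2 (get_digit row digit) 0 + 1)))]
  by_cases harr : array = []
  · subst harr
    rw [pvSeg_congr _ (fun _ => []) _ (fun j _ => by simp [pvFilt]), pvSeg_nil]
    simp [PySem.List.pyRange_one_eq_nil]
  · obtain ⟨y, hy⟩ := List.exists_mem_of_ne_nil array harr
    have hb : 0 < b := by have := hx y hy; omega
    have hbtn : ((b.toNat : Nat) : Int) = b := by omega
    obtain ⟨hcL, hcV⟩ := count_loop digit b array (List.replicate b.toNat 0) (by simp) hx
    have hC : ∀ j : Nat, j < b.toNat →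
        PySem.List.pyGetD (array.foldl (fun cnt row =>
          PySem.List.pySetD cnt (get_digit row digit)
            (PySem.List.pyGetD cnt (get_digit row digit) 0 + 1))
          (List.replicate b.toNat 0)) (j : Int) 0 =
        ((pvFilt digit (j : Int) array).length : Int) := by
      intro j hj
      rw [hcV j hj, PySem.List.pyGetD_natCast]
      simp [List.getD]
    obtain ⟨hpL, hpV⟩ := pos_loop digit b array _ hC b.toNat (le_refl _)
    rw [show b + 1 = 1 + ((b.toNat : Nat) : Int) by omega]
    have hlenT : (pvSeg (fun k => pvFilt digit (k : Int) array) b.toNat).length = array.length :=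
      pvSeg_filt_length digit b array hx
    have htemp : (List.replicate array.length ([] : List Int)) =
        pvSeg (fun k => pvFilt digit (k : Int) ([] : List (List Int)) ++
          List.replicate (pvFilt digit (k : Int) array).length ([] : List Int)) b.toNat := by
      have h1 : pvSeg (fun k => pvFilt digit (k : Int) ([] : List (List Int)) ++
          List.replicate (pvFilt digit (k : Int) array).length ([] : List Int)) b.toNat =
          pvSeg (fun k => List.replicate (pvFilt digit (k : Int) array).length ([] : List Int)) b.toNat :=
        pvSeg_congr _ _ _ (fun j _ => by simp [pvFilt])
      have h2 := pvSeg_replicate ([] : List Int)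
        (fun k => (pvFilt digit (k : Int) array).length) b.toNat
      have h3 : (pvSeg (fun k => List.replicate (pvFilt digit (k : Int) array).length
          ([] : List Int)) b.toNat).length =
          (pvSeg (fun k => pvFilt digit (k : Int) array) b.toNat).length :=
        pvSeg_length_congr _ _ _ (fun j _ => by simp)
      rw [h1, h2, h3, hlenT]
    have hpos0 : ∀ k : Nat, k < b.toNat →
        PySem.List.pyGetD ((PySem.List.pyRange 1 (1 + ((b.toNat : Nat) : Int)) 1).foldl
          (fun pos i => PySem.List.pySetD pos i
            (PySem.List.pyGetD pos (i - 1) 0 +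
             PySem.List.pyGetD (array.foldl (fun cnt row =>
               PySem.List.pySetD cnt (get_digit row digit)
                 (PySem.List.pyGetD cnt (get_digit row digit) 0 + 1))
               (List.replicate b.toNat 0)) (i - 1) 0))
          (0 :: List.replicate b.toNat 0)) (k : Int) 0 =
        ((pvSeg (fun j => pvFilt digit (j : Int) array) k).length : Int) +
        ((pvFilt digit (k : Int) ([] : List (List Int))).length : Int) := by
      intro k hk
      rw [hpV k (le_of_lt hk)]
      simp [pvFilt]
    have hsc := scatter_loop digit b array hx array [] rfl
      (List.replicate array.length ([] : List Int)) _ htemp hpL hpos0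
    rw [hsc]
    have hcopy := copy_aux (pvSeg (fun k => pvFilt digit (k : Int) array) b.toNat)
      (pvSeg (fun k => pvFilt digit (k : Int) array) b.toNat).length array
      (by rw [hlenT]) (le_refl _) (by simp)
    rw [Nat.sub_self, Nat.cast_zero] at hcopy
    rw [show (array.length : Int) =
        ((pvSeg (fun k => pvFilt digit (k : Int) array) b.toNat).length : Int) by rw [hlenT]]
    exact hcopy

-- ===== VERDICT (by name: the statement is the Claim_ definition above) =====
theorem radix_aux_spec : Claim_equal_radix_aux := by
  intro array b digit _hdom hpre
  unfold Spec_radix_aux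
  have hx := pre_elim array b digit hpre
  rw [a_eq_target array b digit hx, alt_eq_target array b digit hx]
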